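-- pv_equiv track=rewrite | github.com/Awiomanik/UtilityScripts | Scripts/file_diff.py | process_diff
-- ===== SOURCE A (Python) =====
-- def process_diff(difference, f1_name, f2_name):
--      '''Create diff_list containing both lists with their difference messages'''
--      # String constants
--      difference_top = "\n##### DIFFERENCE IN FILES #####\n"
--      from_1 = "\nFROM FILE {} :\n".format(f1_name)
--      from_2 = "\nFROM FILE {} :\n".format(f2_name)
--      difference_bot = "\n############# END #############\n\n"
--
--      final_list = []
--      buffer = []
--      from_list_1_bool = False
--      from_list_2_bool = False
--
--      for line in difference:
--           # Lines are the same -> append lines from buffer and this line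
--           if line.startswith('  '):
--                if from_list_1_bool:
--                     buffer.append(difference_bot)
--                     from_list_1_bool = False
--                if from_list_2_bool:
--                     buffer.append(difference_bot)
--                     from_list_2_bool = False
--                if buffer:
--                     final_list.extend(buffer)
--                     buffer.clear()
--                final_list.append(line[2:])
--
--           # Line in list 1 only -> add line to the buffer
--           elif line.startswith('- '):
--                if not from_list_1_bool:
--                     if not from_list_2_bool:
--                          buffer.append(difference_top)
--                     buffer.append(from_1)
--                     from_list_1_bool = True
--                     from_list_2_bool = False
--                buffer.append(line[2:])
--
--           # Line in list 2 only -> add line line to the buffer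
--           elif line.startswith('+ '):
--                if not from_list_2_bool:
--                     if not from_list_1_bool:
--                          buffer.append(difference_top)
--                     buffer.append(from_2)
--                     from_list_2_bool = True
--                     from_list_1_bool = False
--                buffer.append(line[2:])
--
--      # Add any remaining Elements from the buffer
--      if buffer:
--           final_list.extend(buffer)
--           final_list.append(difference_bot)
--
--      return final_list
-- ===== SOURCE B (Python) =====
-- def process_diff(difference, f1_name, f2_name):
--     '''Create diff_list containing both lists with their difference messages'''
--     difference_top = "\n##### DIFFERENCE IN FILES #####\n"
--     from_header = {'- ': "\nFROM FILE {} :\n".format(f1_name),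
--                    '+ ': "\nFROM FILE {} :\n".format(f2_name)}
--     difference_bot = "\n############# END #############\n\n"
--
--     # Pass 1: keep only the recognised line kinds (everything else is ignored).
--     keep = [l for l in difference if l[:2] in ('  ', '- ', '+ ')]
--
--     # Pass 2: emit context lines directly; a maximal stretch of '- '/'+ ' lines
--     # forms one difference block, rendered in full (top, side headers, bottom)
--     # as soon as it is parsed -- no buffering is needed.
--     out = []
--     i, n = 0, len(keep)
--     while i < n:
--         if keep[i].startswith('  '):
--             out.append(keep[i][2:])
--             i += 1
--         else:
--             out.append(difference_top)
--             prev = None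
--             while i < n and not keep[i].startswith('  '):
--                 pfx = keep[i][:2]
--                 if pfx != prev:
--                     out.append(from_header[pfx])
--                     prev = pfx
--                 out.append(keep[i][2:])
--                 i += 1
--             out.append(difference_bot)
--     return out
-- ===== Notes on version B (the rewrite author's own statement) =====
-- stated objective: simpler
-- what changed: Replaces A's single-pass state machine with a buffer list and two boolean side flags by two stages: a filter pass that drops unrecognised lines, then a block parser that emits each context line directly and renders every maximal '-'/'+' stretch as a complete block (top, side headers, bottom) immediately, eliminating the buffer and the flags entirely. (a timing run measured this ~1.5-1.8x faster: no buffer list is built and re-flushed).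
import Mathlib
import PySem

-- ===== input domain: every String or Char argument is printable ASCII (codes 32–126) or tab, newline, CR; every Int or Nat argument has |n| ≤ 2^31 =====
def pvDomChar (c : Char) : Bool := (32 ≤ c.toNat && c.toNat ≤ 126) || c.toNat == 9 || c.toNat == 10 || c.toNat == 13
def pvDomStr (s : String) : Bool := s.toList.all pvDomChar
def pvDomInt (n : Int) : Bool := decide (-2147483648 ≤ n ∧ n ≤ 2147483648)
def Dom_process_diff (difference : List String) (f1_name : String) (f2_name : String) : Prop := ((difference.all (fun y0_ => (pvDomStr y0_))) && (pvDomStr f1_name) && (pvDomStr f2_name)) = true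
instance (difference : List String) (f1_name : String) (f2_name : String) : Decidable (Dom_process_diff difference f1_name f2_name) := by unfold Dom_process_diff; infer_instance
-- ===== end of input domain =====

-- B replaces A's buffered state machine (buffer list + two boolean flags) by two stages:
-- filter out unrecognised lines, then parse maximal '-'/'+' stretches as whole blocks and
-- render each block completely on the spot; same output (objective: simpler).

def pvTop : String := "\n##### DIFFERENCE IN FILES #####\n"
def pvBot : String := "\n############# END #############\n\n"
def pvFrom (name : String) : String := PySem.Str.join "" ["\nFROM FILE ", name, " :\n"]
def pvStrip (l : String) : String := PySem.Str.slice l (some 2) none   -- line[2:]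
def pvKey (l : String) : String := PySem.Str.slice l none (some 2)     -- l[:2]

-- ===== PORT A =====
-- per-line step of A's for-loop; state = (final_list, buffer, from_list_1_bool, from_list_2_bool)
def pvStepA (f1 f2 : String) (s : List String × List String × Bool × Bool) (line : String) :
    List String × List String × Bool × Bool :=
  let (fin, buf, b1, b2) := s
  if PySem.Str.startswith line "  " then
    let buf := if b1 then buf ++ [pvBot] else buf
    let buf := if b2 then buf ++ [pvBot] else buf
    let (fin, buf) := if buf ≠ [] then (fin ++ buf, []) else (fin, buf)
    (fin ++ [pvStrip line], buf, false, false)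
  else if PySem.Str.startswith line "- " then
    let (buf, b1, b2) :=
      if ¬ b1 then ((if ¬ b2 then buf ++ [pvTop] else buf) ++ [pvFrom f1], true, false)
      else (buf, b1, b2)
    (fin, buf ++ [pvStrip line], b1, b2)
  else if PySem.Str.startswith line "+ " then
    let (buf, b1, b2) :=
      if ¬ b2 then ((if ¬ b1 then buf ++ [pvTop] else buf) ++ [pvFrom f2], false, true)
      else (buf, b1, b2)
    (fin, buf ++ [pvStrip line], b1, b2)
  else
    (fin, buf, b1, b2)

def process_diff (difference : List String) (f1_name : String) (f2_name : String) : List String :=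
  let s := difference.foldl (pvStepA f1_name f2_name) ([], [], false, false)
  let (fin, buf, _, _) := s
  if buf ≠ [] then fin ++ buf ++ [pvBot] else fin

-- ===== PORT B =====
-- Source B's filter predicate: l[:2] in ('  ', '- ', '+ ')
def pvKept (l : String) : Bool := pvKey l == "  " || pvKey l == "- " || pvKey l == "+ "

-- Source B's from_header lookup
def pvHdr (f1 f2 pfx : String) : String := if pfx == "- " then pvFrom f1 else pvFrom f2

-- inner while loop of Source B: consume the non-context lines of one block
def pvBlock (f1 f2 : String) (prev : Option String) : List String → List String
  | [] => []
  | x :: xs =>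
      (if some (pvKey x) ≠ prev then [pvHdr f1 f2 (pvKey x)] else []) ++
        pvStrip x :: pvBlock f1 f2 (some (pvKey x)) xs

-- outer while loop of Source B over the filtered list
def pvRender (f1 f2 : String) : List String → List String
  | [] => []
  | x :: xs =>
      if PySem.Str.startswith x "  " then
        pvStrip x :: pvRender f1 f2 xs
      else
        pvTop ::
          (pvBlock f1 f2 none ((x :: xs).takeWhile (fun y => !PySem.Str.startswith y "  ")) ++
            [pvBot] ++ pvRender f1 f2 ((x :: xs).dropWhile (fun y => !PySem.Str.startswith y "  ")))
termination_by xs => xs.length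
decreasing_by
  all_goals simp_all
  exact List.length_dropWhile_le _ _

def process_diff_alt (difference : List String) (f1_name : String) (f2_name : String) : List String :=
  pvRender f1_name f2_name (difference.filter pvKept)

-- ===== PRECONDITION & SPEC =====
def Spec_process_diff (difference : List String) (f1_name : String) (f2_name : String) (out : List String) : Prop := out = process_diff_alt difference f1_name f2_name
instance (difference : List String) (f1_name : String) (f2_name : String) (out : List String) : Decidable (Spec_process_diff difference f1_name f2_name out) := by unfold Spec_process_diff; infer_instance

-- ===== CLAIM (what is proved, stated in full; the proofs are below) =====
def Claim_equal_process_diff : Prop := ∀ (difference : List String) (f1_name : String) (f2_name : String), Dom_process_diff difference f1_name f2_name → Spec_process_diff difference f1_name f2_name (process_diff difference f1_name f2_name)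

-- ===== LEMMAS AND PROOFS =====

theorem pvStartswith_eq_key (l p : String) (hp : p.toList.length = 2) :
    PySem.Str.startswith l p = (pvKey l == p) := by
  have hk : (pvKey l).toList = l.toList.take 2 := by simp [pvKey, pysem]
  rw [Bool.eq_iff_iff, PySem.Str.startswith_eq, PySem.Chars.startswith_iff, beq_iff_eq,
    List.prefix_iff_eq_take, hp, ← String.toList_inj, hk, eq_comm]

-- unfolding lemmas for the well-founded pvRender
theorem pvRender_nil (f1 f2 : String) : pvRender f1 f2 [] = [] := by
  rw [pvRender]

theorem pvRender_cons (f1 f2 x : String) (xs : List String) :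
    pvRender f1 f2 (x :: xs) =
      if PySem.Str.startswith x "  " then
        pvStrip x :: pvRender f1 f2 xs
      else
        pvTop ::
          (pvBlock f1 f2 none ((x :: xs).takeWhile (fun y => !PySem.Str.startswith y "  ")) ++
            [pvBot] ++ pvRender f1 f2 ((x :: xs).dropWhile (fun y => !PySem.Str.startswith y "  "))) := by
  rw [pvRender]

-- evaluated forms of A's per-line step on each line category
theorem pvStepA_ctx (f1 f2 x : String) (hx : pvKey x = "  ") (fin buf : List String)
    (b1 b2 : Bool) (hb : ¬ (b1 = true ∧ b2 = true)) :
    pvStepA f1 f2 (fin, buf, b1, b2) x =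
      (fin ++ buf ++ (if b1 || b2 then [pvBot] else []) ++ [pvStrip x], [], false, false) := by
  rw [pvStepA, pvStartswith_eq_key x "  " (by decide)]
  cases b1 <;> cases b2 <;>
    first
    | exact absurd ⟨rfl, rfl⟩ hb
    | (simp only [hx]; by_cases hbuf : buf = [] <;> simp [hbuf])

theorem pvStepA_minus (f1 f2 x : String) (hx : pvKey x = "- ") (fin buf : List String)
    (b1 b2 : Bool) (hb : ¬ (b1 = true ∧ b2 = true)) :
    pvStepA f1 f2 (fin, buf, b1, b2) x =
      (fin, buf ++ (if b1 then [] else (if b2 then [] else [pvTop]) ++ [pvFrom f1])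
        ++ [pvStrip x], true, false) := by
  rw [pvStepA, pvStartswith_eq_key x "  " (by decide),
    pvStartswith_eq_key x "- " (by decide)]
  cases b1 <;> cases b2 <;>
    first
    | exact absurd ⟨rfl, rfl⟩ hb
    | simp [hx]

theorem pvStepA_plus (f1 f2 x : String) (hx : pvKey x = "+ ") (fin buf : List String)
    (b1 b2 : Bool) (hb : ¬ (b1 = true ∧ b2 = true)) :
    pvStepA f1 f2 (fin, buf, b1, b2) x =
      (fin, buf ++ (if b2 then [] else (if b1 then [] else [pvTop]) ++ [pvFrom f2])
        ++ [pvStrip x], false, true) := by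
  rw [pvStepA, pvStartswith_eq_key x "  " (by decide),
    pvStartswith_eq_key x "- " (by decide), pvStartswith_eq_key x "+ " (by decide)]
  cases b1 <;> cases b2 <;>
    first
    | exact absurd ⟨rfl, rfl⟩ hb
    | simp [hx]

theorem pvStepA_other (f1 f2 x : String) (hx : pvKept x = false)
    (s : List String × List String × Bool × Bool) :
    pvStepA f1 f2 s x = s := by
  obtain ⟨fin, buf, b1, b2⟩ := s
  simp only [pvKept, Bool.or_eq_false_iff, beq_eq_false_iff_ne, ne_eq] at hx
  rw [pvStepA, pvStartswith_eq_key x "  " (by decide),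
    pvStartswith_eq_key x "- " (by decide), pvStartswith_eq_key x "+ " (by decide)]
  simp [hx.1.1, hx.1.2, hx.2]

-- A's fold skips unkept lines: it equals the fold over the filtered list
theorem pvFold_filter (f1 f2 : String) (xs : List String) :
    ∀ s, xs.foldl (pvStepA f1 f2) s = (xs.filter pvKept).foldl (pvStepA f1 f2) s := by
  induction xs with
  | nil => intro s; rfl
  | cons x xs ih =>
    intro s
    by_cases hx : pvKept x = true
    · simp [hx, ih]
    · simp only [Bool.not_eq_true] at hx
      simp [hx, pvStepA_other f1 f2 x hx, ih]

-- reference rendering of the tail, parameterised by the currently open side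
def pvG (f1 f2 : String) : Option String → List String → List String
  | side, [] => if side = none then [] else [pvBot]
  | side, y :: ys =>
      if pvKey y = "  " then
        (if side = none then [] else [pvBot]) ++ pvStrip y :: pvG f1 f2 none ys
      else
        (if side = none then [pvTop] else []) ++
          (if side ≠ some (pvKey y) then [pvHdr f1 f2 (pvKey y)] else []) ++
          pvStrip y :: pvG f1 f2 (some (pvKey y)) ys

def pvSideOf (b1 b2 : Bool) : Option String :=
  if b1 then some "- " else if b2 then some "+ " else none

def pvFinish (s : List String × List String × Bool × Bool) : List String :=
  let (fin, buf, _, _) := s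
  if buf ≠ [] then fin ++ buf ++ [pvBot] else fin

-- main invariant: A's fold + final flush = prefix ++ buffer ++ reference rendering
theorem pvMain (f1 f2 : String) (ys : List String) :
    ∀ (fin buf : List String) (b1 b2 : Bool), (∀ y ∈ ys, pvKept y = true) →
      ¬ (b1 = true ∧ b2 = true) → (buf = [] ↔ (b1 = false ∧ b2 = false)) →
      pvFinish (ys.foldl (pvStepA f1 f2) (fin, buf, b1, b2)) =
        fin ++ buf ++ pvG f1 f2 (pvSideOf b1 b2) ys := by
  induction ys with
  | nil =>
    intro fin buf b1 b2 _ hb hbuf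
    cases b1 <;> cases b2 <;>
      first
      | exact absurd ⟨rfl, rfl⟩ hb
      | simp_all [pvFinish, pvG, pvSideOf]
  | cons y ys ih =>
    intro fin buf b1 b2 hk hb hbuf
    have hky : pvKept y = true := hk y (by simp)
    have hkys : ∀ z ∈ ys, pvKept z = true := fun z hz => hk z (by simp [hz])
    simp only [pvKept, Bool.or_eq_true, beq_iff_eq] at hky
    rcases hky with (hc | hm) | hp
    · rw [List.foldl_cons, pvStepA_ctx f1 f2 y hc fin buf b1 b2 hb,
        ih _ [] false false hkys (by simp) (by simp), pvG]
      cases b1 <;> cases b2 <;>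
        first
        | exact absurd ⟨rfl, rfl⟩ hb
        | simp_all [pvSideOf]
    · rw [List.foldl_cons, pvStepA_minus f1 f2 y hm fin buf b1 b2 hb,
        ih _ _ true false hkys (by simp) (by simp), pvG]
      cases b1 <;> cases b2 <;>
        first
        | exact absurd ⟨rfl, rfl⟩ hb
        | simp_all [pvSideOf, pvHdr]
    · rw [List.foldl_cons, pvStepA_plus f1 f2 y hp fin buf b1 b2 hb,
        ih _ _ false true hkys (by simp) (by simp), pvG]
      cases b1 <;> cases b2 <;>
        first
        | exact absurd ⟨rfl, rfl⟩ hb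
        | simp_all [pvSideOf, pvHdr]

-- B's two-function renderer equals the reference rendering (joint induction)
theorem pvRender_eq_G (f1 f2 : String) (ys : List String) (hk : ∀ y ∈ ys, pvKept y = true) :
    pvRender f1 f2 ys = pvG f1 f2 none ys ∧
      ∀ k, k = "- " ∨ k = "+ " →
        pvG f1 f2 (some k) ys =
          pvBlock f1 f2 (some k) (ys.takeWhile (fun y => !PySem.Str.startswith y "  ")) ++
            [pvBot] ++ pvRender f1 f2 (ys.dropWhile (fun y => !PySem.Str.startswith y "  ")) := by
  induction ys with
  | nil => exact ⟨pvRender_nil f1 f2, by intro k _; simp [pvG, pvRender_nil, pvBlock]⟩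
  | cons y ys ih =>
    have hky : pvKept y = true := hk y (by simp)
    obtain ⟨ihR, ihB⟩ := ih (fun z hz => hk z (by simp [hz]))
    simp only [pvKept, Bool.or_eq_true, beq_iff_eq] at hky
    rcases hky with (hc | hm) | hp
    · -- context head
      have hY : PySem.Str.startswith y "  " = true := by
        rw [pvStartswith_eq_key y "  " (by decide), hc]; decide
      have hr : pvRender f1 f2 (y :: ys) = pvStrip y :: pvRender f1 f2 ys := by
        rw [pvRender_cons, hY]; simp
      constructor
      · rw [hr, pvG]; simp [hc, ihR]
      · intro k hkk
        rw [pvG, List.takeWhile_cons, List.dropWhile_cons, hY]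
        simp [pvBlock, hc, hr, ihR]
    · -- '- ' head
      have hN : PySem.Str.startswith y "  " = false := by
        rw [pvStartswith_eq_key y "  " (by decide), hm]; decide
      have hB := ihB "- " (Or.inl rfl)
      constructor
      · rw [pvRender_cons, hN, pvG, List.takeWhile_cons, List.dropWhile_cons, hN]
        simp [pvBlock, hm, hB]
      · intro k hkk
        rw [pvG, List.takeWhile_cons, List.dropWhile_cons, hN]
        by_cases hkm : k = "- "
        · simp [pvBlock, hm, hB, hkm]
        · have hkm' : "- " ≠ k := fun h => hkm h.symm
          simp [pvBlock, hm, hB, hkm, hkm']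
    · -- '+ ' head
      have hN : PySem.Str.startswith y "  " = false := by
        rw [pvStartswith_eq_key y "  " (by decide), hp]; decide
      have hB := ihB "+ " (Or.inr rfl)
      constructor
      · rw [pvRender_cons, hN, pvG, List.takeWhile_cons, List.dropWhile_cons, hN]
        simp [pvBlock, hp, hB]
      · intro k hkk
        rw [pvG, List.takeWhile_cons, List.dropWhile_cons, hN]
        by_cases hkp : k = "+ "
        · simp [pvBlock, hp, hB, hkp]
        · have hkp' : "+ " ≠ k := fun h => hkp h.symm
          simp [pvBlock, hp, hB, hkp, hkp']

-- ===== VERDICT (by name: the statement is the Claim_ definition above) =====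
theorem process_diff_spec : Claim_equal_process_diff := by
  intro difference f1 f2 _
  unfold Spec_process_diff process_diff_alt
  have h1 : process_diff difference f1 f2 =
      pvFinish (difference.foldl (pvStepA f1 f2) ([], [], false, false)) := rfl
  rw [h1, pvFold_filter f1 f2 difference,
    pvMain f1 f2 (difference.filter pvKept) [] [] false false
      (fun y hy => (List.mem_filter.mp hy).2) (by simp) (by simp),
    (pvRender_eq_G f1 f2 (difference.filter pvKept)
      (fun y hy => (List.mem_filter.mp hy).2)).1]
  simp [pvSideOf]
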